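-- pv_equiv track=rewrite | github.com/ios-study-boost/codingtest | 이진호/day10/day10_200910.py | solution
-- ===== SOURCE A (Python) =====
-- def solution(phone_book):
--     ''' Key Point - pop the element from phone_book,
--                     Check the phone_book includes pop string with 0 index
--                     Except same string
--     '''
--     cp_list = phone_book.copy()
--     while len(phone_book) > 0:
--         check = phone_book.pop(0)
--         for index in cp_list:
--             if index.find(check) == 0 and not check == index:
--                 return False
--     return True
-- ===== SOURCE B (Python) =====
-- def solution(phone_book):
--     book = set(phone_book)
--     for s in phone_book:
--         for i in range(len(s)):
--             if s[:i] in book: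
--                 return False
--     return True
-- ===== Notes on version B (the rewrite author's own statement) =====
-- stated objective: faster
-- what changed: Instead of A's nested scan comparing every popped string against the whole list with str.find, B builds a set of the strings once and tests each string's proper prefixes for set membership, removing the inner O(n) list scan (A also empties its argument in place; B does not mutate it).
import Mathlib
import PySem

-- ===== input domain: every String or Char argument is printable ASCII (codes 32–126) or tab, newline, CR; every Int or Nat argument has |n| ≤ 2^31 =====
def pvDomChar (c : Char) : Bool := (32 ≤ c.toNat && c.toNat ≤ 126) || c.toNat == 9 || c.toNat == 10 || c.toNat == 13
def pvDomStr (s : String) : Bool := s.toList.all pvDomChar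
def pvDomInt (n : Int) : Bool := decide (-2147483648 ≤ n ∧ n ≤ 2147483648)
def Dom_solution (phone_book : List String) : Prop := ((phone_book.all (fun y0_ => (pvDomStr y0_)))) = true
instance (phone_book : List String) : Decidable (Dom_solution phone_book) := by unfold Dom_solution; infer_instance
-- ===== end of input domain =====

-- B replaces A's quadratic pairwise scan by a membership set queried with each string's
-- proper prefixes; equivalence is about the RETURN value only (Python A empties its
-- argument in place via pop(0); B leaves it untouched).

-- ===== PORT A =====
-- the while loop: pop the head of phone_book, scan the (fixed) copy cp_list
def solutionLoop (cp_list : List String) : List String → Bool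
  | [] => true
  | check :: rest =>
      if cp_list.any (fun index => PySem.Str.find index check == 0 && !(check == index)) then
        false
      else
        solutionLoop cp_list rest

def solution (phone_book : List String) : Bool :=
  let cp_list := phone_book   -- phone_book.copy()
  solutionLoop cp_list phone_book

-- ===== PORT B =====
def solution_alt (phone_book : List String) : Bool :=
  let book : PySem.Set String := PySem.Set.ofList phone_book
  !(phone_book.any (fun s =>
      (PySem.List.pyRange 0 (PySem.Str.len s) 1).any (fun i =>
        PySem.Set.contains book (PySem.Str.slice s none (some i)))))

-- ===== PRECONDITION & SPEC =====
def Spec_solution (phone_book : List String) (out : Bool) : Prop := out = solution_alt phone_book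
instance (phone_book : List String) (out : Bool) : Decidable (Spec_solution phone_book out) := by unfold Spec_solution; infer_instance

-- ===== CLAIM (what is proved, stated in full; the proofs are below) =====
def Claim_equal_solution : Prop := ∀ (phone_book : List String), Dom_solution phone_book → Spec_solution phone_book (solution phone_book)

-- ===== LEMMAS AND PROOFS =====

-- Python's s.find(sub) == 0 means exactly "sub is a prefix of s"
theorem find_eq_zero_iff_prefix (s sub : List Char) :
    PySem.Chars.find s sub = 0 ↔ sub <+: s := by
  have hz := PySem.Chars.findFrom_zero s sub
  constructor
  · intro h
    have hne : PySem.Chars.find s sub ≠ -1 := by omega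
    have hspec := PySem.Chars.findFrom_natCast_spec s sub 0 (Nat.zero_le _)
      (by simpa [hz] using hne)
    simp only [Nat.cast_zero, hz, h] at hspec
    simpa using hspec.2.1
  · intro h
    have hne : PySem.Chars.find s sub ≠ -1 :=
      (PySem.Chars.find_ne_neg_one_iff s sub).mpr h.isInfix
    have hspec := PySem.Chars.findFrom_natCast_spec s sub 0 (Nat.zero_le _)
      (by simpa [hz] using hne)
    simp only [Nat.cast_zero, hz] at hspec
    obtain ⟨h1, -, h3⟩ := hspec
    by_contra hne0
    exact h3 0 (Nat.zero_le _) (by omega) (by simpa using h)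

-- A's while/for loop is an 'any' over the remaining list
theorem solutionLoop_eq (cp rest : List String) :
    solutionLoop cp rest
      = !(rest.any (fun check =>
            cp.any (fun index => PySem.Str.find index check == 0 && !(check == index)))) := by
  induction rest with
  | nil => simp [solutionLoop]
  | cons check rest ih =>
      cases h : cp.any (fun index => PySem.Str.find index check == 0 && !(check == index)) <;>
        simp only [solutionLoop, h, ih, List.any_cons, Bool.false_eq_true, if_false, if_true,
          Bool.false_or, Bool.true_or, Bool.not_true]

-- Set.contains on a set built by ofList is list membership
theorem contains_ofList_iff (xs : List String) (x : String) :
    PySem.Set.contains (PySem.Set.ofList xs) x = true ↔ x ∈ xs := by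
  simp [PySem.Set.contains, PySem.Set.mem_ofList]

-- ===== VERDICT (by name: the statement is the Claim_ definition above) =====
theorem solution_spec : Claim_equal_solution := by
  intro pb _
  show solution pb = solution_alt pb
  unfold solution solution_alt
  rw [solutionLoop_eq]
  congr 1
  rw [Bool.eq_iff_iff]
  simp only [List.any_eq_true, Bool.and_eq_true, beq_iff_eq, Bool.not_eq_true',
    beq_eq_false_iff_ne, ne_eq, PySem.Str.find_eq, PySem.List.mem_pyRange_one,
    contains_ofList_iff, PySem.Str.len_eq]
  constructor
  · rintro ⟨check, hc, index, hi, hf, hne⟩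
    have hpre : check.toList <+: index.toList := (find_eq_zero_iff_prefix _ _).mp hf
    have hlt : check.toList.length < index.toList.length := by
      rcases lt_or_eq_of_le hpre.length_le with h | h
      · exact h
      · exact absurd (String.toList_inj.mp (hpre.eq_of_length h)) hne
    refine ⟨index, hi, (check.toList.length : ℤ), ⟨by positivity, by exact_mod_cast hlt⟩, ?_⟩
    have heq : PySem.Str.slice index none (some (check.toList.length : ℤ)) = check := by
      apply String.toList_inj.mp
      rw [PySem.Str.toList_slice, PySem.Chars.slice_eq_listSlice, PySem.List.slice_to_natCast]
      exact (List.prefix_iff_eq_take.mp hpre).symm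
    rw [heq]; exact hc
  · rintro ⟨s, hs, i, ⟨h0, hlt⟩, hmem⟩
    set p := PySem.Str.slice s none (some i) with hp
    have hpl : p.toList = s.toList.take i.toNat := by
      rw [hp, PySem.Str.toList_slice, PySem.Chars.slice_eq_listSlice,
        PySem.List.slice_to s.toList h0]
    have hlen : p.toList.length < s.toList.length := by
      rw [hpl, List.length_take]; omega
    refine ⟨p, hmem, s, hs, ?_, ?_⟩
    · exact (find_eq_zero_iff_prefix _ _).mpr (hpl ▸ List.take_prefix _ _)
    · intro h; rw [h] at hlen; omega
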